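-- pv_equiv track=rewrite | github.com/DeanLa/imoh | imoh/io.py | _get_file_name_options
-- ===== SOURCE A (Python) =====
-- def _get_file_name_options(year, week):
--     base_path = 'http://www.health.gov.il/PublicationsFiles/IWER'
--     options = ['{base}{week:02d}_{year}.xls'.format(base=base_path, week=week, year=year),
--                '{base}{week}_{year}.xls'.format(base=base_path, week=week, year=year),
--                '{base}{week:02d}_{year}.xlsx'.format(base=base_path, week=week, year=year),
--                '{base}{week}_{year}.xlsx'.format(base=base_path, week=week, year=year)]
--
--     options_s = [o.replace('http', 'https') for o in options]
--     return options + options_s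
-- ===== SOURCE B (Python) =====
-- def _get_file_name_options(year, week):
--     options = []
--     for proto in ('http', 'https'):
--         base = proto + '://www.health.gov.il/PublicationsFiles/IWER'
--         for ext in ('xls', 'xlsx'):
--             for w in ('{:02d}'.format(week), '{}'.format(week)):
--                 options.append('{}{}_{}.{}'.format(base, w, year, ext))
--     return options
-- ===== Notes on version B (the rewrite author's own statement) =====
-- stated objective: alternative
-- what changed: B generates all eight URLs directly by iterating over the three axes protocol/extension/week-format (protocol baked into the base string), instead of A's four hand-written http literals followed by a replace('http','https') substitution pass.
import Mathlib
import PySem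

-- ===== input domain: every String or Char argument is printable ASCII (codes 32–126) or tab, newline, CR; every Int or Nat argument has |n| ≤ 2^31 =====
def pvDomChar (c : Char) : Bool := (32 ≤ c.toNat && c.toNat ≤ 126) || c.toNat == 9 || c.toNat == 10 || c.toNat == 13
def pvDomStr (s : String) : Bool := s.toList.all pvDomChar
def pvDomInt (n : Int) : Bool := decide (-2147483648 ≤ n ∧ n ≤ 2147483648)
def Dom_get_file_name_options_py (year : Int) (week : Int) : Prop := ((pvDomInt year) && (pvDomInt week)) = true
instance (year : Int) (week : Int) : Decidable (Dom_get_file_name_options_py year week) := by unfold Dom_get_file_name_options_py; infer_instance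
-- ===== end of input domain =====

-- B builds the eight URLs by iterating over protocol/extension/week-format instead of
-- A's four written-out http literals plus a replace('http','https') pass; same values, no speed claim.

-- Hand port of Python's format spec '{:02d}' (PySem has no format): exact, since at width 2 the
-- only case needing padding is a single-character (hence non-negative, single-digit) rendering.
def pvFmt02 (n : Int) : List Char :=
  if (PySem.Int.toChars n).length < 2 then '0' :: PySem.Int.toChars n else PySem.Int.toChars n

-- ===== PORT A =====
def get_file_name_options_py (year : Int) (week : Int) : List String :=
  let basePath := "http://www.health.gov.il/PublicationsFiles/IWER"
  let options : List String :=
    [String.ofList (basePath.toList ++ pvFmt02 week ++ '_' :: PySem.Int.toChars year ++ ".xls".toList),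
     String.ofList (basePath.toList ++ PySem.Int.toChars week ++ '_' :: PySem.Int.toChars year ++ ".xls".toList),
     String.ofList (basePath.toList ++ pvFmt02 week ++ '_' :: PySem.Int.toChars year ++ ".xlsx".toList),
     String.ofList (basePath.toList ++ PySem.Int.toChars week ++ '_' :: PySem.Int.toChars year ++ ".xlsx".toList)]
  let options_s := options.map (fun o => PySem.Str.replace o "http" "https")
  options ++ options_s

-- ===== PORT B =====
def get_file_name_options_py_alt (year : Int) (week : Int) : List String :=
  ["http", "https"].flatMap (fun proto =>
    let base := proto.toList ++ "://www.health.gov.il/PublicationsFiles/IWER".toList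
    ["xls", "xlsx"].flatMap (fun ext =>
      [pvFmt02 week, PySem.Int.toChars week].map (fun w =>
        String.ofList (base ++ w ++ '_' :: PySem.Int.toChars year ++ '.' :: ext.toList))))

-- ===== PRECONDITION & SPEC =====
def Spec_get_file_name_options_py (year : Int) (week : Int) (out : List String) : Prop := out = get_file_name_options_py_alt year week
instance (year : Int) (week : Int) (out : List String) : Decidable (Spec_get_file_name_options_py year week out) := by unfold Spec_get_file_name_options_py; infer_instance

-- ===== CLAIM (what is proved, stated in full; the proofs are below) =====
def Claim_equal_get_file_name_options_py : Prop := ∀ (year : Int) (week : Int), Dom_get_file_name_options_py year week → Spec_get_file_name_options_py year week (get_file_name_options_py year week)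

-- ===== LEMMAS AND PROOFS =====

-- "no 'h' immediately followed by 't'" — then replace('http', …) is the identity.
def pvR (a b : Char) : Prop := ¬(a = 'h' ∧ b = 't')

def pvNoHT : List Char → Bool
  | a :: b :: t => !(a == 'h' && b == 't') && pvNoHT (b :: t)
  | _ => true

theorem pvNoHT_isChain : ∀ l : List Char, pvNoHT l = true → List.IsChain pvR l
  | [] => fun _ => List.isChain_nil
  | [a] => fun _ => List.isChain_singleton a
  | a :: b :: t => fun h => by
    rw [pvNoHT, Bool.and_eq_true] at h
    exact List.isChain_cons_cons.mpr
      ⟨fun hc => by simp [hc.1, hc.2] at h, pvNoHT_isChain (b :: t) h.2⟩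

theorem pvChainForall {l : List Char} (h : ∀ c ∈ l, c ≠ 't' ∧ c ≠ 'h') :
    List.IsChain pvR l := by
  induction l with
  | nil => exact List.isChain_nil
  | cons a l ih =>
    cases l with
    | nil => exact List.isChain_singleton a
    | cons b m =>
      rw [List.isChain_cons_cons]
      refine ⟨fun hab => (h b (by simp)).1 hab.2, ih fun c hc => h c (List.mem_cons_of_mem _ hc)⟩

theorem pvChainAppend {l1 l2 : List Char} (h1 : List.IsChain pvR l1)
    (h2 : List.IsChain pvR l2) (h2' : ∀ c ∈ l2, c ≠ 't') : List.IsChain pvR (l1 ++ l2) := by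
  rw [List.isChain_append]
  refine ⟨h1, h2, fun x hx y hy => ?_⟩
  have : y ∈ l2 := List.mem_of_mem_head? hy
  exact fun hc => h2' y this hc.2

theorem pvGoNoop (new : List Char) (fuel : Nat) (l acc : List Char)
    (h : List.IsChain pvR l) :
    PySem.Chars.replace.go ['h', 't', 't', 'p'] new fuel l acc = acc.reverse ++ l := by
  induction fuel generalizing l acc with
  | zero => rw [PySem.Chars.replace.go]
  | succ n ih =>
    cases l with
    | nil => rw [PySem.Chars.replace.go] <;> simp
    | cons c t =>
      rw [PySem.Chars.replace.go]
      have hnp : List.isPrefixOf ['h', 't', 't', 'p'] (c :: t) = false := by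
        by_contra hx
        have hp : ['h', 't', 't', 'p'] <+: c :: t := by
          rw [← List.isPrefixOf_iff_prefix]; revert hx; cases List.isPrefixOf ['h','t','t','p'] (c::t) <;> simp
        obtain ⟨s, hs⟩ := hp
        simp at hs
        obtain ⟨hc, ht⟩ := hs
        subst hc
        rw [← ht] at h
        exact h.rel_head ⟨rfl, rfl⟩
      rw [hnp]
      simp only [Bool.false_eq_true, if_false]
      have ht : List.IsChain pvR t := h.tail
      rw [ih t (c :: acc) ht]
      simp

theorem pvReplaceHttp (rest : List Char) (h : List.IsChain pvR rest) :
    PySem.Chars.replace ('h' :: 't' :: 't' :: 'p' :: rest) ['h', 't', 't', 'p'] "https".toList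
      = "https".toList ++ rest := by
  rw [PySem.Chars.replace]
  simp only [List.isEmpty_cons, List.length_cons, Bool.false_eq_true, if_false]
  rw [PySem.Chars.replace.go]
  have : List.isPrefixOf ['h', 't', 't', 'p'] ('h' :: 't' :: 't' :: 'p' :: rest) = true := by
    simp [List.isPrefixOf]
  rw [this]
  simp only [if_true, List.length_cons, List.drop_succ_cons, List.length_nil, List.drop_zero]
  rw [pvGoNoop _ _ _ _ h]
  simp

-- chars of Nat.toDigitsCore are digit chars (enough: never 't' or 'h')
theorem pvToDigitsCoreChars (fuel n : Nat) (acc : List Char)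
    (hacc : ∀ c ∈ acc, c ≠ 't' ∧ c ≠ 'h') :
    ∀ c ∈ Nat.toDigitsCore 10 fuel n acc, c ≠ 't' ∧ c ≠ 'h' := by
  induction fuel generalizing n acc with
  | zero => rw [Nat.toDigitsCore]; exact hacc
  | succ f ih =>
    rw [Nat.toDigitsCore]
    have hd : (n % 10).digitChar ≠ 't' ∧ (n % 10).digitChar ≠ 'h' := by
      have h10 : n % 10 < 10 := Nat.mod_lt _ (by norm_num)
      interval_cases h : n % 10 <;> simp [Nat.digitChar]
    have hacc' : ∀ c ∈ (n % 10).digitChar :: acc, c ≠ 't' ∧ c ≠ 'h' := by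
      intro c hc; rcases List.mem_cons.mp hc with h | h
      · exact h ▸ hd
      · exact hacc c h
    by_cases h0 : n / 10 = 0
    · simpa [h0] using hacc'
    · simpa [h0] using ih (n / 10) _ hacc'

theorem pvToCharsChars (n : Int) : ∀ c ∈ PySem.Int.toChars n, c ≠ 't' ∧ c ≠ 'h' := by
  unfold PySem.Int.toChars
  split
  · intro c hc
    rcases List.mem_cons.mp hc with h | h
    · subst h; exact ⟨by decide, by decide⟩
    · exact pvToDigitsCoreChars _ _ [] (by simp) c (by simpa [Nat.toDigits] using h)
  · exact fun c hc => pvToDigitsCoreChars _ _ [] (by simp) c (by simpa [Nat.toDigits] using hc)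

theorem pvFmt02Chars (n : Int) : ∀ c ∈ pvFmt02 n, c ≠ 't' ∧ c ≠ 'h' := by
  unfold pvFmt02
  intro c hc
  split at hc
  · rcases List.mem_cons.mp hc with h | h
    · subst h; exact ⟨by decide, by decide⟩
    · exact pvToCharsChars n c h
  · exact pvToCharsChars n c hc

-- the chain condition for the whole suffix after 'http'
theorem pvChainRest (w : List Char) (year : Int) (ext : List Char)
    (hw : ∀ c ∈ w, c ≠ 't' ∧ c ≠ 'h')
    (hext : ∀ c ∈ ext, c ≠ 't' ∧ c ≠ 'h') :
    List.IsChain pvR ("://www.health.gov.il/PublicationsFiles/IWER".toList ++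
      (w ++ '_' :: PySem.Int.toChars year ++ '.' :: ext)) := by
  have hAll : ∀ c ∈ w ++ '_' :: PySem.Int.toChars year ++ '.' :: ext, c ≠ 't' ∧ c ≠ 'h' := by
    intro c hc
    simp only [List.mem_append, List.mem_cons] at hc
    rcases hc with (h | rfl | h) | rfl | h
    · exact hw c h
    · exact ⟨by decide, by decide⟩
    · exact pvToCharsChars year c h
    · exact ⟨by decide, by decide⟩
    · exact hext c h
  have hfixed : List.IsChain pvR "://www.health.gov.il/PublicationsFiles/IWER".toList :=
    pvNoHT_isChain _ (by decide)
  exact pvChainAppend hfixed (pvChainForall hAll) (fun c hc => (hAll c hc).1)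

theorem pvReplaceUrl (w : List Char) (year : Int) (ext : List Char)
    (hw : ∀ c ∈ w, c ≠ 't' ∧ c ≠ 'h')
    (hext : ∀ c ∈ ext, c ≠ 't' ∧ c ≠ 'h') :
    PySem.Str.replace
      (String.ofList ("http://www.health.gov.il/PublicationsFiles/IWER".toList ++
        w ++ '_' :: PySem.Int.toChars year ++ '.' :: ext)) "http" "https"
      = String.ofList ("https".toList ++ "://www.health.gov.il/PublicationsFiles/IWER".toList ++
        w ++ '_' :: PySem.Int.toChars year ++ '.' :: ext) := by
  unfold PySem.Str.replace
  rw [String.toList_ofList]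
  have hsplit : "http://www.health.gov.il/PublicationsFiles/IWER".toList ++
      w ++ '_' :: PySem.Int.toChars year ++ '.' :: ext
      = 'h' :: 't' :: 't' :: 'p' :: ("://www.health.gov.il/PublicationsFiles/IWER".toList ++
        (w ++ '_' :: PySem.Int.toChars year ++ '.' :: ext)) := by
    simp
  rw [hsplit]
  rw [show "http".toList = ['h','t','t','p'] from rfl]
  rw [pvReplaceHttp _ (pvChainRest w year ext hw hext)]
  simp

-- ===== VERDICT (by name: the statement is the Claim_ definition above) =====

theorem get_file_name_options_py_spec : Claim_equal_get_file_name_options_py := by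
  intro year week _
  unfold Spec_get_file_name_options_py get_file_name_options_py get_file_name_options_py_alt
  simp only [List.map, List.flatMap]
  have hxls : (".xls".toList : List Char) = '.' :: "xls".toList := rfl
  have hxlsx : (".xlsx".toList : List Char) = '.' :: "xlsx".toList := rfl
  have hbase : ("http://www.health.gov.il/PublicationsFiles/IWER".toList : List Char)
      = "http".toList ++ "://www.health.gov.il/PublicationsFiles/IWER".toList := by decide
  have hextxls : ∀ c ∈ ("xls".toList : List Char), c ≠ 't' ∧ c ≠ 'h' := by
    intro c hc; fin_cases hc <;> exact ⟨by decide, by decide⟩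
  have hextxlsx : ∀ c ∈ ("xlsx".toList : List Char), c ≠ 't' ∧ c ≠ 'h' := by
    intro c hc; fin_cases hc <;> exact ⟨by decide, by decide⟩
  rw [hxls, hxlsx]
  generalize hg1 : ("xls".toList : List Char) = e1
  generalize hg2 : ("xlsx".toList : List Char) = e2
  rw [hg1] at hextxls
  rw [hg2] at hextxlsx
  rw [pvReplaceUrl (pvFmt02 week) year e1 (pvFmt02Chars week) hextxls,
      pvReplaceUrl (PySem.Int.toChars week) year e1 (pvToCharsChars week) hextxls,
      pvReplaceUrl (pvFmt02 week) year e2 (pvFmt02Chars week) hextxlsx,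
      pvReplaceUrl (PySem.Int.toChars week) year e2 (pvToCharsChars week) hextxlsx]
  simp [hbase]
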